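-- pv_equiv track=rewrite | github.com/INSM-TUM-Teaching/business-process-redesign | change_operations/collapse_operation.py | get_unique_elements_between_collapse_activities
-- ===== SOURCE A (Python) =====
-- from typing import List
--
-- def get_unique_elements_between_collapse_activities(variants: List[List[str]], collapse_activities: List[str]) -> List[str]:
--     """
--     Extracts all unique elements that occur between any two collapse activities across multiple variants.
--
--     Args:
--         variants: A list of variants, each being a list of activity names.
--         collapse_activities: A set of activity names considered for collapsing.
--
--     Returns:
--         A list of unique activity names that are strictly between two consecutive collapse activities.
--     """
--     elements_in_between = []
--
--     for variant in variants:
--         # Find indexes of collapse activities in this variant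
--         collapse_indexes = [i for i, activity in enumerate(variant) if activity in collapse_activities]
--         collapse_indexes.sort()
--
--         for i in range(len(collapse_indexes) - 1):
--             start = collapse_indexes[i]
--             end = collapse_indexes[i + 1]
--             # Add elements between start and end
--             for elem in variant[start + 1:end]:
--                 if elem not in collapse_activities and elem not in elements_in_between:
--                     elements_in_between.append(elem)
--
--     return elements_in_between
-- ===== SOURCE B (Python) =====
-- from typing import List
--
-- def get_unique_elements_between_collapse_activities(variants: List[List[str]], collapse_activities: List[str]) -> List[str]:
--     """One pass per variant: the consecutive-pair slices of A tile exactly the span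
--     between the first and last collapse activity, so scan that single slice once."""
--     elements_in_between = []
--
--     for variant in variants:
--         first = None
--         last = None
--         for i, activity in enumerate(variant):
--             if activity in collapse_activities:
--                 if first is None:
--                     first = i
--                 last = i
--         if first is not None and first < last:
--             for elem in variant[first + 1:last]:
--                 if elem not in collapse_activities and elem not in elements_in_between:
--                     elements_in_between.append(elem)
--
--     return elements_in_between
-- ===== Notes on version B (the rewrite author's own statement) =====
-- stated objective: simpler
-- what changed: Replaces A's sorted index list plus nested loop over consecutive index pairs with sub-slices by one first/last-position scan and a single contiguous slice pass per variant (the pair slices tile exactly the span between the first and last collapse activity).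
import Mathlib
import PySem

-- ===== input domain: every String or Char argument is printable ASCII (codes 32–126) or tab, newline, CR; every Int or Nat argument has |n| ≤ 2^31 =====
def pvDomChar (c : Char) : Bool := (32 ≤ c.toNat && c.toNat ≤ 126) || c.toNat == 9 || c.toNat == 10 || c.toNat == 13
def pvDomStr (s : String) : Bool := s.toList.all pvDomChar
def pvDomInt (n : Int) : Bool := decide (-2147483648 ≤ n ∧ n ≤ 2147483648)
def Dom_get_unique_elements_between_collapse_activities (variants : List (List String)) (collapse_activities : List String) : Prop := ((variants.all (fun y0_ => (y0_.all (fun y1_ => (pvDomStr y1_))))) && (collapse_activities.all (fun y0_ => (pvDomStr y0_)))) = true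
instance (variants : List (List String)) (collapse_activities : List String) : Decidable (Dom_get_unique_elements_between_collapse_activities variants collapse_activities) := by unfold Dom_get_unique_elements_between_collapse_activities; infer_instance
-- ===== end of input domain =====

-- B replaces A's sorted-index-list + consecutive-pair inner loops by a single first/last
-- scan and one contiguous slice pass per variant (objective: simpler).

-- ===== PORT A =====
def get_unique_elements_between_collapse_activities (variants : List (List String)) (collapse_activities : List String) : List String :=
  variants.foldl (fun elements_in_between variant =>
    -- collapse_indexes = [i for i, activity in enumerate(variant) if activity in collapse_activities]
    let collapse_indexes := ((PySem.List.enumerate variant).filter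
        (fun p => decide (p.2 ∈ collapse_activities))).map (fun p => p.1)
    -- collapse_indexes.sort()
    let collapse_indexes := PySem.List.sorted collapse_indexes (fun i => i)
    -- for i in range(len(collapse_indexes) - 1): … for elem in variant[start+1:end]: …
    (PySem.List.pyRange 0 ((collapse_indexes.length : Int) - 1)).foldl (fun acc i =>
      let start := PySem.List.pyGetD collapse_indexes i 0
      let stop := PySem.List.pyGetD collapse_indexes (i + 1) 0
      (PySem.List.slice variant (some (start + 1)) (some stop)).foldl
        (fun acc2 elem =>
          if elem ∉ collapse_activities ∧ elem ∉ acc2 then acc2 ++ [elem] else acc2) acc)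
      elements_in_between) []

-- ===== PORT B =====
def get_unique_elements_between_collapse_activities_alt (variants : List (List String)) (collapse_activities : List String) : List String :=
  variants.foldl (fun elements_in_between variant =>
    -- one pass recording the first and last position of a collapse activity
    let fl := (PySem.List.enumerate variant).foldl
      (fun (s : Option Int × Option Int) p =>
        if p.2 ∈ collapse_activities then
          (if s.1 = none then some p.1 else s.1, some p.1)
        else s)
      (none, none)
    match fl with
    | (some first, some last) =>
      if first < last then
        (PySem.List.slice variant (some (first + 1)) (some last)).foldl
          (fun acc2 elem =>
            if elem ∉ collapse_activities ∧ elem ∉ acc2 then acc2 ++ [elem] else acc2)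
          elements_in_between
      else elements_in_between
    | _ => elements_in_between) []

-- ===== PRECONDITION & SPEC =====
def Spec_get_unique_elements_between_collapse_activities (variants : List (List String)) (collapse_activities : List String) (out : List String) : Prop := out = get_unique_elements_between_collapse_activities_alt variants collapse_activities
instance (variants : List (List String)) (collapse_activities : List String) (out : List String) : Decidable (Spec_get_unique_elements_between_collapse_activities variants collapse_activities out) := by unfold Spec_get_unique_elements_between_collapse_activities; infer_instance

-- ===== CLAIM (what is proved, stated in full; the proofs are below) =====
def Claim_equal_get_unique_elements_between_collapse_activities : Prop := ∀ (variants : List (List String)) (collapse_activities : List String), Dom_get_unique_elements_between_collapse_activities variants collapse_activities → Spec_get_unique_elements_between_collapse_activities variants collapse_activities (get_unique_elements_between_collapse_activities variants collapse_activities)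

-- ===== LEMMAS AND PROOFS =====

-- the shared inner append step ('if elem not in C and elem not in out: out.append(elem)')
def pvAdd (C : List String) (acc : List String) (e : String) : List String :=
  if e ∉ C ∧ e ∉ acc then acc ++ [e] else acc

theorem pvAdd_of_mem (C : List String) (acc : List String) {e : String} (h : e ∈ C) :
    pvAdd C acc e = acc := by simp [pvAdd, h]

-- the (Nat) positions of collapse activities in v, counting from n
def pvIdxs (C : List String) : List String → Nat → List Nat
  | [], _ => []
  | x :: xs, n => if x ∈ C then n :: pvIdxs C xs (n + 1) else pvIdxs C xs (n + 1)

-- A's sorted index list (definitionally the value A computes per variant)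
def pvJs (C v : List String) : List Int :=
  PySem.List.sorted (((PySem.List.enumerate v).filter
    (fun p => decide (p.2 ∈ C))).map (fun p => p.1)) (fun i => i)

-- B's first/last fold (definitionally the value B computes per variant)
def pvFLfold (C v : List String) : Option Int × Option Int :=
  (PySem.List.enumerate v).foldl
    (fun (s : Option Int × Option Int) p =>
      if p.2 ∈ C then (if s.1 = none then some p.1 else s.1, some p.1) else s)
    (none, none)

-- folding pvAdd over the slice strictly between positions a and b
def pvSliceFold (C v : List String) (a b : Nat) (acc : List String) : List String :=
  ((v.drop (a + 1)).take (b - (a + 1))).foldl (pvAdd C) acc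

-- A's pair loop, structurally over the index list
def pvPairFold (C v : List String) : List Nat → List String → List String
  | j0 :: j1 :: rest, acc => pvPairFold C v (j1 :: rest) (pvSliceFold C v j0 j1 acc)
  | _, acc => acc

theorem pvEnum (C : List String) : ∀ (v : List String) (n : Nat),
    ((PySem.List.enumerate v (n : Int)).filter (fun p => decide (p.2 ∈ C))).map (fun p => p.1)
      = (pvIdxs C v n).map (fun (k : Nat) => (k : Int)) := by
  intro v
  induction v with
  | nil => intro n; simp [PySem.List.enumerate_nil, pvIdxs]
  | cons x xs ih =>
    intro n
    rw [PySem.List.enumerate_cons]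
    have hcast : ((n : Int) + 1) = ((n + 1 : Nat) : Int) := by push_cast; ring
    by_cases hx : x ∈ C
    · simp only [List.filter_cons, hcast, pvIdxs, hx, decide_true, if_pos, List.map_cons,
        ih (n + 1)]
    · simp only [List.filter_cons, hcast, pvIdxs, hx, decide_false, Bool.false_eq_true,
        if_false, ih (n + 1)]

theorem pvIdxs_mem (C : List String) : ∀ (v : List String) (n k : Nat), k ∈ pvIdxs C v n →
    n ≤ k ∧ ∃ x, v[k - n]? = some x ∧ x ∈ C := by
  intro v
  induction v with
  | nil => intro n k h; simp [pvIdxs] at h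
  | cons x xs ih =>
    intro n k h
    simp only [pvIdxs] at h
    by_cases hx : x ∈ C
    · rw [if_pos hx] at h
      rcases List.mem_cons.mp h with rfl | h'
      · exact ⟨le_refl _, x, by simp, hx⟩
      · obtain ⟨hle, y, hy, hyC⟩ := ih (n + 1) k h'
        refine ⟨by omega, y, ?_, hyC⟩
        have hkn : k - n = (k - (n + 1)) + 1 := by omega
        rw [hkn]; simpa using hy
    · rw [if_neg hx] at h
      obtain ⟨hle, y, hy, hyC⟩ := ih (n + 1) k h
      refine ⟨by omega, y, ?_, hyC⟩
      have hkn : k - n = (k - (n + 1)) + 1 := by omega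
      rw [hkn]; simpa using hy

theorem pvIdxs_pairwise (C : List String) : ∀ (v : List String) (n : Nat),
    (pvIdxs C v n).Pairwise (· < ·) := by
  intro v
  induction v with
  | nil => intro n; simp [pvIdxs]
  | cons x xs ih =>
    intro n
    simp only [pvIdxs]
    by_cases hx : x ∈ C
    · rw [if_pos hx]
      refine List.Pairwise.cons (fun k hk => ?_) (ih (n + 1))
      have := (pvIdxs_mem C xs (n + 1) k hk).1; omega
    · rw [if_neg hx]; exact ih (n + 1)

theorem pvGetD_map (ks : List Nat) (k : Nat) :
    (ks.map (fun (n : Nat) => (n : Int))).getD k 0 = ((ks.getD k 0 : Nat) : Int) := by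
  simp only [List.getD_eq_getElem?_getD, List.getElem?_map]
  cases h : ks[k]? <;> simp

theorem pvCombine (C v : List String) (j0 j1 L : Nat) (acc : List String)
    (h01 : j0 < j1) (h1L : j1 < L) {x : String} (hx : v[j1]? = some x) (hxC : x ∈ C) :
    pvSliceFold C v j1 L (pvSliceFold C v j0 j1 acc) = pvSliceFold C v j0 L acc := by
  obtain ⟨hlen, hget⟩ := List.getElem?_eq_some_iff.mp hx
  unfold pvSliceFold
  have hsplit : (v.drop (j0 + 1)).take (L - (j0 + 1))
      = (v.drop (j0 + 1)).take (j1 - (j0 + 1)) ++ x :: (v.drop (j1 + 1)).take (L - (j1 + 1)) := by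
    have h1 : L - (j0 + 1) = (j1 - (j0 + 1)) + (L - j1) := by omega
    rw [h1, List.take_add, List.drop_drop]
    have h2 : (j0 + 1) + (j1 - (j0 + 1)) = j1 := by omega
    rw [h2]
    have h3 : v.drop j1 = x :: v.drop (j1 + 1) := by
      rw [List.drop_eq_getElem_cons hlen, hget]
    rw [h3]
    have h4 : L - j1 = (L - (j1 + 1)) + 1 := by omega
    rw [h4, List.take_succ_cons]
  rw [hsplit, List.foldl_append, List.foldl_cons, pvAdd_of_mem C _ hxC]

theorem pvRangePair (C v : List String) : ∀ (ks : List Nat) (acc : List String),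
    (List.range (ks.length - 1)).foldl
      (fun acc2 k => pvSliceFold C v (ks.getD k 0) (ks.getD (k + 1) 0) acc2) acc
      = pvPairFold C v ks acc := by
  intro ks
  induction ks with
  | nil => intro acc; simp [pvPairFold]
  | cons j0 tl ih =>
    cases tl with
    | nil => intro acc; simp [pvPairFold]
    | cons j1 rest =>
      intro acc
      have hlen : (j0 :: j1 :: rest).length - 1 = rest.length + 1 := by simp
      rw [hlen, List.range_succ_eq_map, List.foldl_cons, List.foldl_map]
      simp only [Nat.succ_eq_add_one, List.getD_cons_zero, List.getD_cons_succ]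
      simp only [List.getD_cons_succ, List.length_cons, Nat.add_sub_cancel] at ih
      rw [show pvPairFold C v (j0 :: j1 :: rest) acc
        = pvPairFold C v (j1 :: rest) (pvSliceFold C v j0 j1 acc) from rfl]
      exact ih (pvSliceFold C v j0 j1 acc)

theorem pvDecomp (C v : List String) : ∀ (t : List Nat) (j0 j1 : Nat),
    (j0 :: j1 :: t).Pairwise (· < ·) →
    (∀ k ∈ j1 :: t, ∃ x, v[k]? = some x ∧ x ∈ C) →
    ∀ acc, pvPairFold C v (j0 :: j1 :: t) acc
      = pvSliceFold C v j0 ((j1 :: t).getLast (by simp)) acc := by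
  intro t
  induction t with
  | nil =>
    intro j0 j1 _ _ acc
    simp [pvPairFold, List.getLast]
  | cons j2 t ih =>
    intro j0 j1 hp hm acc
    have hp' : (j1 :: j2 :: t).Pairwise (· < ·) := (List.pairwise_cons.mp hp).2
    have hm' : ∀ k ∈ j2 :: t, ∃ x, v[k]? = some x ∧ x ∈ C :=
      fun k hk => hm k (List.mem_cons_of_mem _ hk)
    obtain ⟨x, hx, hxC⟩ := hm j1 (by simp)
    have h01 : j0 < j1 := (List.pairwise_cons.mp hp).1 j1 (by simp)
    have h1L : j1 < (j2 :: t).getLast (by simp) :=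
      (List.pairwise_cons.mp hp').1 _ (List.getLast_mem (by simp))
    have hstep : pvPairFold C v (j0 :: j1 :: j2 :: t) acc
        = pvPairFold C v (j1 :: j2 :: t) (pvSliceFold C v j0 j1 acc) := rfl
    rw [hstep, ih j1 j2 hp' hm' (pvSliceFold C v j0 j1 acc),
      pvCombine C v j0 j1 _ acc h01 h1L hx hxC]
    rw [List.getLast_cons (show (j2 :: t : List Nat) ≠ [] by simp)]

theorem pvFL : ∀ (t : List Nat) (a : Int) (b : Option Int),
    t.foldl (fun (s : Option Int × Option Int) (k : Nat) => (if s.1 = none then some (k : Int) else s.1, some (k : Int))) (some a, b)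
      = (some a, match t.getLast? with | some x => some ((x : Nat) : Int) | none => b) := by
  intro t
  induction t with
  | nil => intro a b; simp
  | cons k t ih =>
    intro a b
    rw [List.foldl_cons]
    have hstep : ((if (some a, b).1 = (none : Option Int) then some (k : Int) else (some a, b).1,
        some (k : Int)) : Option Int × Option Int) = (some a, some (k : Int)) := by simp
    rw [hstep, ih a (some (k : Int))]
    cases t with
    | nil => simp
    | cons k2 t2 =>
      cases hl : (k2 :: t2).getLast? with
      | none => simp at hl
      | some x => rw [List.getLast?_cons_cons, hl]

-- the per-variant bodies of the two ports agree for every accumulator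
theorem pvStep (C v acc : List String) :
    (PySem.List.pyRange 0 (((pvJs C v).length : Int) - 1)).foldl (fun acc2 i =>
      (PySem.List.slice v (some (PySem.List.pyGetD (pvJs C v) i 0 + 1))
        (some (PySem.List.pyGetD (pvJs C v) (i + 1) 0))).foldl (pvAdd C) acc2) acc
    = (match pvFLfold C v with
      | (some first, some last) =>
        if first < last then
          (PySem.List.slice v (some (first + 1)) (some last)).foldl (pvAdd C) acc
        else acc
      | _ => acc) := by
  have henum : ((PySem.List.enumerate v).filter (fun p => decide (p.2 ∈ C))).map (fun p => p.1)
      = (pvIdxs C v 0).map (fun (k : Nat) => (k : Int)) := by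
    simpa using pvEnum C v 0
  have hkpw : (pvIdxs C v 0).Pairwise (· < ·) := pvIdxs_pairwise C v 0
  have hjs : pvJs C v = (pvIdxs C v 0).map (fun (k : Nat) => (k : Int)) := by
    unfold pvJs
    rw [henum]
    exact PySem.List.sorted_eq_of_perm_of_pairwise_lt _ _ (fun i => i) (List.Perm.refl _)
      (by simpa [List.pairwise_map] using hkpw)
  have hmem : ∀ k ∈ pvIdxs C v 0, ∃ x, v[k]? = some x ∧ x ∈ C := by
    intro k hk
    simpa using (pvIdxs_mem C v 0 k hk).2
  have hfl : pvFLfold C v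
      = (pvIdxs C v 0).foldl
          (fun (s : Option Int × Option Int) (k : Nat) => (if s.1 = none then some (k : Int) else s.1, some (k : Int)))
          (none, none) := by
    unfold pvFLfold
    rw [PySem.List.foldl_ite_eq_foldl_filter (p := fun p : Int × String => p.2 ∈ C)
      (f := fun (s : Option Int × Option Int) p =>
        (if s.1 = none then some p.1 else s.1, some p.1))]
    rw [← List.foldl_map (f := fun p : Int × String => p.1)
      (g := fun (s : Option Int × Option Int) (i : Int) =>
        (if s.1 = none then some i else s.1, some i)), henum, List.foldl_map]
  have hslice : ∀ (a b : Nat) (acc2 : List String),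
      (PySem.List.slice v (some (((a : Nat) : Int) + 1)) (some ((b : Nat) : Int))).foldl
        (pvAdd C) acc2 = pvSliceFold C v a b acc2 := by
    intro a b acc2
    rw [show ((a : Nat) : Int) + 1 = ((a + 1 : Nat) : Int) by push_cast; ring,
      PySem.List.slice_natCast]
    rfl
  -- convert the A side to pvPairFold over the Nat index list
  have hA : (PySem.List.pyRange 0 (((pvJs C v).length : Int) - 1)).foldl (fun acc2 i =>
      (PySem.List.slice v (some (PySem.List.pyGetD (pvJs C v) i 0 + 1))
        (some (PySem.List.pyGetD (pvJs C v) (i + 1) 0))).foldl (pvAdd C) acc2) acc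
      = pvPairFold C v (pvIdxs C v 0) acc := by
    rw [PySem.List.pyRange_one, List.foldl_map]
    have hlen : ((((pvJs C v).length : Int) - 1) - 0).toNat = (pvIdxs C v 0).length - 1 := by
      rw [hjs, List.length_map]; omega
    rw [hlen]
    refine Eq.trans (PySem.List.foldl_congr_mem _ _
      (fun acc2 k => pvSliceFold C v ((pvIdxs C v 0).getD k 0) ((pvIdxs C v 0).getD (k + 1) 0) acc2)
      acc ?_) (pvRangePair C v (pvIdxs C v 0) acc)
    intro acc2 k _
    simp only [zero_add]
    rw [hjs, PySem.List.pyGetD_natCast, pvGetD_map,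
      show ((k : Int) + 1) = ((k + 1 : Nat) : Int) by push_cast; ring,
      PySem.List.pyGetD_natCast, pvGetD_map]
    exact hslice _ _ acc2
  rw [hA, hfl]
  -- both sides now speak about the Nat index list; case on its shape
  generalize hgen : pvIdxs C v 0 = ks at hkpw hmem ⊢
  rcases ks with _ | ⟨k0, _ | ⟨k1, t⟩⟩
  · simp [pvPairFold]
  · show acc = (match ((some ((k0 : Nat) : Int), some ((k0 : Nat) : Int)) :
        Option Int × Option Int) with
      | (some first, some last) =>
        if first < last then
          (PySem.List.slice v (some (first + 1)) (some last)).foldl (pvAdd C) acc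
        else acc
      | _ => acc)
    show acc = if ((k0 : Nat) : Int) < ((k0 : Nat) : Int) then
        (PySem.List.slice v (some (((k0 : Nat) : Int) + 1))
          (some ((k0 : Nat) : Int))).foldl (pvAdd C) acc else acc
    rw [if_neg (lt_irrefl _)]
  · have hmem' : ∀ k ∈ k1 :: t, ∃ x, v[k]? = some x ∧ x ∈ C :=
      fun k hk => hmem k (List.mem_cons_of_mem _ hk)
    have hne : (k1 :: t : List Nat) ≠ [] := by simp
    have hk0L : k0 < (k1 :: t).getLast hne :=
      (List.pairwise_cons.mp hkpw).1 _ (List.getLast_mem hne)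
    rw [List.foldl_cons,
      show ((if ((none : Option Int), (none : Option Int)).1 = (none : Option Int)
            then some ((k0 : Nat) : Int) else ((none : Option Int), (none : Option Int)).1,
          some ((k0 : Nat) : Int)) : Option Int × Option Int)
        = (some ((k0 : Nat) : Int), some ((k0 : Nat) : Int)) by simp,
      pvFL (k1 :: t) ((k0 : Nat) : Int) (some ((k0 : Nat) : Int)),
      List.getLast?_eq_some_getLast hne,
      pvDecomp C v t k0 k1 hkpw hmem' acc]
    show pvSliceFold C v k0 ((k1 :: t).getLast hne) acc
      = if ((k0 : Nat) : Int) < (((k1 :: t).getLast hne : Nat) : Int) then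
          (PySem.List.slice v (some (((k0 : Nat) : Int) + 1))
            (some (((k1 :: t).getLast hne : Nat) : Int))).foldl (pvAdd C) acc
        else acc
    rw [if_pos (by exact_mod_cast hk0L)]
    exact (hslice _ _ acc).symm

-- ===== VERDICT (by name: the statement is the Claim_ definition above) =====
theorem get_unique_elements_between_collapse_activities_spec : Claim_equal_get_unique_elements_between_collapse_activities := by
  intro variants C _
  show _ = _
  unfold get_unique_elements_between_collapse_activities get_unique_elements_between_collapse_activities_alt
  exact PySem.List.foldl_congr_mem _ _ _ _ (fun acc v _ => pvStep C v acc)
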